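-- pv_equiv track=rewrite | github.com/JunHyxxn/BOJ | Implementation/Quiz_23291_어항정리.py | add_fish
-- ===== SOURCE A (Python) =====
-- def add_fish(fishbowl):
--     min_value = float("INF")
--     index = []
--     for i in range(len(fishbowl)):
--         if min_value > fishbowl[i]:
--             min_value = fishbowl[i]
--             index = [i]
--         elif min_value == fishbowl[i]:
--             index.append(i)
--
--     for idx in index:
--         fishbowl[idx] += 1
--
--     return fishbowl
-- ===== SOURCE B (Python) =====
-- def add_fish(fishbowl):
--     # Two-phase version: compute the minimum once, then increment every
--     # entry equal to it in place (same list object, same return value).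
--     if fishbowl:
--         m = min(fishbowl)
--         for i, x in enumerate(fishbowl):
--             if x == m:
--                 fishbowl[i] = x + 1
--     return fishbowl
-- ===== Notes on version B (the rewrite author's own statement) =====
-- stated objective: simpler
-- what changed: Replaces A's fused single pass that tracks the running minimum while maintaining a list of its indices (then a second loop over those indices) with a plain two-phase decomposition: compute min(fishbowl) with the builtin, then one pass incrementing each element equal to it; no index list is built.
import Mathlib
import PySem

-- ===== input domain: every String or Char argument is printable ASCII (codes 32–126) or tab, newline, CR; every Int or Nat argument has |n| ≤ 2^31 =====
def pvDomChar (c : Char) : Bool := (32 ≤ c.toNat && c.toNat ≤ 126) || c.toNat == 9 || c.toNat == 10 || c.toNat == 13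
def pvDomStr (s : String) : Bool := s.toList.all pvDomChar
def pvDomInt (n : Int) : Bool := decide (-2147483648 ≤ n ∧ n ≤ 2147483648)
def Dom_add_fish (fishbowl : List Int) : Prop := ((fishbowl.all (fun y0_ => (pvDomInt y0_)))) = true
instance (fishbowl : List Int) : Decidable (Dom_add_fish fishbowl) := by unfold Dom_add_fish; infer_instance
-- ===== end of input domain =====

-- B replaces A's fused min-tracking + index-collecting pass with "compute min, then one
-- increment pass" (simpler decomposition; both mutate the input list in place in Python,
-- the equivalence proved here is about the return value).


-- ===== PORT A =====
-- First loop of A: state is (min_value, index); min_value = none stands for float("INF")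
-- (INF > x is always true and INF == x always false for ints, so the none branch is exact).
-- Indices come from range(len(fishbowl)), hence are nonnegative and in range: List.range /
-- getD i 0 / set are exact for them.
def add_fish_stepA (l : List Int) (s : Option Int × List Nat) (i : Nat) : Option Int × List Nat :=
  match s with
  | (none, _) => (some (l.getD i 0), [i])
  | (some v, idx) =>
    if l.getD i 0 < v then (some (l.getD i 0), [i])
    else if v = l.getD i 0 then (some v, idx ++ [i])
    else (some v, idx)

def add_fish (fishbowl : List Int) : List Int :=
  let s := (List.range fishbowl.length).foldl (add_fish_stepA fishbowl) (none, [])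
  -- second loop: for idx in index: fishbowl[idx] += 1
  s.2.foldl (fun acc i => acc.set i (acc.getD i 0 + 1)) fishbowl

-- ===== PORT B =====
-- Source B: if empty, return unchanged (min? = none exactly then); else m = min(fishbowl) and
-- one enumerate pass writing x+1 at each position holding x = m (position-wise rewrite = map).
def add_fish_alt (fishbowl : List Int) : List Int :=
  match PySem.List.min? fishbowl (fun x => x) with
  | none => fishbowl
  | some m => fishbowl.map (fun x => if x = m then x + 1 else x)

-- ===== PRECONDITION & SPEC =====
def Spec_add_fish (fishbowl : List Int) (out : List Int) : Prop := out = add_fish_alt fishbowl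
instance (fishbowl : List Int) (out : List Int) : Decidable (Spec_add_fish fishbowl out) := by unfold Spec_add_fish; infer_instance

-- ===== CLAIM (what is proved, stated in full; the proofs are below) =====
def Claim_equal_add_fish : Prop := ∀ (fishbowl : List Int), Dom_add_fish fishbowl → Spec_add_fish fishbowl (add_fish fishbowl)

-- ===== LEMMAS AND PROOFS =====

-- the index list A's first loop produces, characterised: all positions holding the minimum
def add_fish_idxSpec (l : List Int) : List Nat :=
  match PySem.List.min? l (fun x => x) with
  | none => []
  | some m => (List.range l.length).filter (fun i => l.getD i 0 = m)

theorem add_fish_min_append (l : List Int) (a : Int) :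
    PySem.List.min? (l ++ [a]) (fun x => x) =
      some (match PySem.List.min? l (fun x => x) with
            | none => a
            | some m => min m a) := by
  cases l with
  | nil =>
      have h0 : PySem.List.min? ([] : List Int) (fun x => x) = none := by
        rw [PySem.List.min?_eq_none_iff]
      rw [List.nil_append, h0, PySem.List.min?_id_cons]
      rfl
  | cons x t =>
      rw [List.cons_append, PySem.List.min?_id_cons, PySem.List.min?_id_cons,
        List.foldl_append]
      simp

theorem add_fish_stepA_prefix (l : List Int) (a : Int) (s : Option Int × List Nat) (i : Nat)
    (h : i < l.length) : add_fish_stepA (l ++ [a]) s i = add_fish_stepA l s i := by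
  obtain ⟨mv, idx⟩ := s
  cases mv <;> simp only [add_fish_stepA] <;> rw [List.getD_append _ _ _ _ h]

theorem add_fish_idx_lt (l : List Int) (i : Nat) (h : i ∈ add_fish_idxSpec l) :
    i < l.length := by
  unfold add_fish_idxSpec at h
  cases hm : PySem.List.min? l (fun x => x) with
  | none => simp [hm] at h
  | some m =>
      rw [hm] at h
      exact List.mem_range.mp (List.mem_of_mem_filter h)

theorem add_fish_loop1 (l : List Int) :
    (List.range l.length).foldl (add_fish_stepA l) (none, []) =
      (PySem.List.min? l (fun x => x), add_fish_idxSpec l) := by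
  induction l using List.reverseRecOn with
  | nil =>
      have h0 : PySem.List.min? ([] : List Int) (fun x => x) = none := by
        rw [PySem.List.min?_eq_none_iff]
      simp [add_fish_idxSpec, h0]
  | append_singleton l a ih =>
      have hlen : (l ++ [a]).length = l.length + 1 := by simp
      rw [hlen, List.range_succ, List.foldl_append,
        PySem.List.foldl_congr_mem (List.range l.length) (add_fish_stepA (l ++ [a]))
          (add_fish_stepA l) (none, [])
          (fun acc x hx => add_fish_stepA_prefix l a acc x (List.mem_range.mp hx)),
        ih]
      have hgetn : (l ++ [a]).getD l.length 0 = a := by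
        rw [List.getD_append_right _ _ _ _ (le_refl _)]; simp
      have hfiltpre : ∀ (m : Int),
          (List.range l.length).filter (fun i => (l ++ [a]).getD i 0 = m) =
          (List.range l.length).filter (fun i => l.getD i 0 = m) := by
        intro m
        refine List.filter_congr (fun i hi => ?_)
        rw [List.getD_append _ _ _ _ (List.mem_range.mp hi)]
      cases hm : PySem.List.min? l (fun x => x) with
      | none =>
          have hl : l = [] := (PySem.List.min?_eq_none_iff l _).mp hm
          subst hl
          simp [add_fish_stepA, add_fish_idxSpec, PySem.List.min?_id_cons]
      | some m =>
          rw [add_fish_min_append, hm]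
          unfold add_fish_idxSpec
          rw [add_fish_min_append, hm, hlen, List.range_succ]
          dsimp only
          rw [List.filter_append]
          have hidx : add_fish_idxSpec l =
              (List.range l.length).filter (fun i => l.getD i 0 = m) := by
            simp [add_fish_idxSpec, hm]
          by_cases hlt : a < m
          · have hmin : min m a = a := by omega
            rw [hmin, hfiltpre]
            have hempty : (List.range l.length).filter (fun i => l.getD i 0 = a) = [] := by
              rw [List.filter_eq_nil_iff]
              intro i hi
              have hil := List.mem_range.mp hi
              have hmem : l.getD i 0 ∈ l := by
                rw [List.getD_eq_getElem l 0 hil]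
                exact List.getElem_mem hil
              have := PySem.List.min?_isMin hm _ hmem
              simp only [decide_eq_true_eq]
              omega
            rw [hempty]
            simp [add_fish_stepA, hlt]
          · by_cases heq : m = a
            · subst heq
              have hmin : min m m = m := by omega
              rw [hmin, hfiltpre, ← hidx]
              simp [add_fish_stepA]
            · have hmin : min m a = m := by omega
              rw [hmin, hfiltpre, ← hidx]
              have hne3 : a ≠ m := fun h => heq h.symm
              simp [add_fish_stepA, hlt, hne3, heq]

theorem add_fish_inc_append (l : List Int) (a : Int) (idxs : List Nat)
    (h : ∀ i ∈ idxs, i < l.length) :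
    idxs.foldl (fun acc i => acc.set i (acc.getD i 0 + 1)) (l ++ [a]) =
      idxs.foldl (fun acc i => acc.set i (acc.getD i 0 + 1)) l ++ [a] := by
  induction idxs generalizing l with
  | nil => rfl
  | cons i t ih =>
      have hi : i < l.length := h i (List.mem_cons_self)
      simp only [List.foldl_cons]
      rw [List.getD_append _ _ _ _ hi, List.set_append_left _ _ hi]
      exact ih _ (fun j hj => by
        have := h j (List.mem_cons_of_mem _ hj); simpa using this)

theorem add_fish_map_id (l : List Int) (m a : Int) (hm : PySem.List.min? l (fun x => x) = some m)
    (hlt : a < m) : l.map (fun x => if x = a then x + 1 else x) = l := by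
  have : ∀ x ∈ l, (fun x => if x = a then x + 1 else x) x = x := by
    intro x hx
    have := PySem.List.min?_isMin hm _ hx
    simp only
    rw [if_neg (by omega)]
  rw [List.map_congr_left this]
  simp

theorem add_fish_loop2 (l : List Int) :
    (add_fish_idxSpec l).foldl (fun acc i => acc.set i (acc.getD i 0 + 1)) l =
      add_fish_alt l := by
  induction l using List.reverseRecOn with
  | nil =>
      have h0 : PySem.List.min? ([] : List Int) (fun x => x) = none := by
        rw [PySem.List.min?_eq_none_iff]
      simp [add_fish_idxSpec, add_fish_alt, h0]
  | append_singleton l a ih =>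
      unfold add_fish_idxSpec add_fish_alt
      rw [add_fish_min_append]
      cases hm : PySem.List.min? l (fun x => x) with
      | none =>
          have hl : l = [] := (PySem.List.min?_eq_none_iff l _).mp hm
          subst hl
          simp
      | some m =>
          have hlen : (l ++ [a]).length = l.length + 1 := by simp
          rw [hlen, List.range_succ]
          dsimp only
          rw [List.filter_append]
          have hfiltpre : ∀ (m' : Int),
              (List.range l.length).filter (fun i => (l ++ [a]).getD i 0 = m') =
              (List.range l.length).filter (fun i => l.getD i 0 = m') := by
            intro m'
            refine List.filter_congr (fun i hi => ?_)
            rw [List.getD_append _ _ _ _ (List.mem_range.mp hi)]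
          have hgetn : (l ++ [a]).getD l.length 0 = a := by
            rw [List.getD_append_right _ _ _ _ (le_refl _)]; simp
          have hidx : add_fish_idxSpec l =
              (List.range l.length).filter (fun i => l.getD i 0 = m) := by
            simp [add_fish_idxSpec, hm]
          have hbound : ∀ i ∈ add_fish_idxSpec l, i < l.length := add_fish_idx_lt l
          have ihm : (add_fish_idxSpec l).foldl (fun acc i => acc.set i (acc.getD i 0 + 1)) l =
              l.map (fun x => if x = m then x + 1 else x) := by
            rw [ih]; simp [add_fish_alt, hm]
          by_cases hlt : a < m
          · have hmin : min m a = a := by omega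
            rw [hmin, hfiltpre]
            have hempty : (List.range l.length).filter (fun i => l.getD i 0 = a) = [] := by
              rw [List.filter_eq_nil_iff]
              intro i hi
              have hil := List.mem_range.mp hi
              have hmem : l.getD i 0 ∈ l := by
                rw [List.getD_eq_getElem l 0 hil]
                exact List.getElem_mem hil
              have := PySem.List.min?_isMin hm _ hmem
              simp only [decide_eq_true_eq]
              omega
            rw [hempty]
            simp only [List.nil_append, List.map_append]
            rw [add_fish_map_id l m a hm hlt]
            simp [List.foldl_cons, List.set_append_right _ _ (le_refl l.length)]
          · by_cases heq : a = m
            · subst heq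
              have hmin : min a a = a := by omega
              rw [hmin, hfiltpre, ← hidx]
              have hkeep : List.filter (fun i => (l ++ [a]).getD i 0 = a) [l.length]
                  = [l.length] := by simp [List.filter]
              rw [hkeep, List.foldl_append, add_fish_inc_append l a _ hbound, ihm]
              have hlen2 : (l.map (fun x => if x = a then x + 1 else x)).length = l.length := by
                simp
              simp only [List.foldl_cons, List.foldl_nil]
              rw [← hlen2, List.getD_append_right _ _ _ _ (le_refl _),
                List.set_append_right _ _ (le_refl _)]
              simp [List.map_append]
            · have hmin : min m a = m := by omega
              rw [hmin, hfiltpre, ← hidx]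
              have hdrop : List.filter (fun i => (l ++ [a]).getD i 0 = m) [l.length]
                  = [] := by simp [List.filter, List.getD, heq]
              rw [hdrop, List.append_nil, add_fish_inc_append l a _ hbound, ihm]
              simp [List.map_append, heq]

-- ===== VERDICT (by name: the statement is the Claim_ definition above) =====
theorem add_fish_spec : Claim_equal_add_fish := by
  intro l _
  unfold Spec_add_fish add_fish
  rw [add_fish_loop1]
  exact add_fish_loop2 l
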